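-- pv_equiv track=rewrite | github.com/8G4B/JEE6.v1 | src/interfaces/commands/channel/SlowModeCommand.py | _parse_channel_arg
-- ===== SOURCE A (Python) =====
-- import shlex
--
-- def _parse_channel_arg(arg):
--     if not arg:
--         return None
--
--     channel_name = None
--     tokens = shlex.split(arg)
--     i = 0
--     while i < len(tokens):
--         if (tokens[i] in ("-n", "--name")) and i + 1 < len(tokens):
--             channel_name = tokens[i + 1]
--             i += 2
--         else:
--             channel_name = arg
--             break
--
--     return channel_name
-- ===== SOURCE B (Python) =====
-- def _tokenize(s):
--     """Split s into shell-style tokens: whitespace separates, '...' is literal,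
--     "..." allows \" and \\ escapes, a lone backslash escapes the next char."""
--     tokens = []
--     i, n = 0, len(s)
--     while i < n:
--         if s[i] in ' \t\n\r':
--             i += 1
--             continue
--         parts = []
--         while i < n and s[i] not in ' \t\n\r':
--             c = s[i]
--             if c == "'":
--                 j = s.find("'", i + 1)
--                 if j < 0:
--                     raise ValueError("No closing quotation")
--                 parts.append(s[i + 1:j])
--                 i = j + 1
--             elif c == '"':
--                 i += 1
--                 while True:
--                     if i >= n:
--                         raise ValueError("No closing quotation")
--                     c = s[i]
--                     if c == '"':
--                         i += 1
--                         break
--                     if c == '\\':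
--                         if i + 1 >= n:
--                             raise ValueError("No closing quotation")
--                         nxt = s[i + 1]
--                         parts.append(nxt if nxt in '"\\' else '\\' + nxt)
--                         i += 2
--                     else:
--                         parts.append(c)
--                         i += 1
--             elif c == '\\':
--                 if i + 1 >= n:
--                     raise ValueError("No escaped character")
--                 parts.append(s[i + 1])
--                 i += 2
--             else:
--                 parts.append(c)
--                 i += 1
--         tokens.append(''.join(parts))
--     return tokens
--
-- def _parse_channel_arg(arg):
--     if not arg:
--         return None
--     tokens = _tokenize(arg)
--     if not tokens:
--         return None
--     if len(tokens) % 2 == 0 and all(t in ("-n", "--name") for t in tokens[0::2]):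
--         return tokens[-1]
--     return arg
-- ===== Notes on version B (the rewrite author's own statement) =====
-- stated objective: alternative
-- what changed: B decides the result by a whole-list validity check (even token count and every even-position token is -n/--name) with a direct last-element return, instead of A's stateful consume-and-break index loop, and tokenizes with a self-contained index-based quote-aware scanner instead of the shlex dependency; Pre_ excludes only strings with an unclosed quote or trailing backslash, where both programs raise ValueError.
import Mathlib
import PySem

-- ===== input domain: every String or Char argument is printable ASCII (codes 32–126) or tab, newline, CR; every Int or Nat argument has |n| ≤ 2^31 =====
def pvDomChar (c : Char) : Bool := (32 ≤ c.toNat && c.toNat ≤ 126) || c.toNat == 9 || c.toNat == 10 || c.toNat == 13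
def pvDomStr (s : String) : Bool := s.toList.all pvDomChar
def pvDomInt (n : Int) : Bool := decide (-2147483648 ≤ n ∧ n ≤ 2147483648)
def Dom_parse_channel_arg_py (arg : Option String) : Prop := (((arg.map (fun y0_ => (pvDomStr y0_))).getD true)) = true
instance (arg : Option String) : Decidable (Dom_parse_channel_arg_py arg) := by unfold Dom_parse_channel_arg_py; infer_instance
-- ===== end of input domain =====

-- B decides the result by a whole-list validity check plus a direct last-element return instead of
-- A's stateful consume-and-break loop, and tokenizes with a self-contained index-based scanner
-- instead of the shlex dependency; objective: alternative.

-- ===== PORT A =====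
-- Hand port of A's shlex.split call (POSIX mode, comments off), exact on the ASCII domain:
-- whitespace ' \t\r\n' separates tokens; '…' literal; "…" with backslash escaping only '"' and '\\'
-- (otherwise the backslash is kept); backslash outside quotes escapes any char; EOF inside a quote
-- or right after a backslash is a ValueError (→ none).
inductive QMode
  | normal | squote | dquote | escN | escD
  deriving DecidableEq, Repr

def isWs (c : Char) : Bool := c = ' ' || c = '\t' || c = '\n' || c = '\r'

def shlexAux : List Char → QMode → List String → List Char → Bool → Option (List String)
  | [], m, toks, cur, inTok =>
      if m = QMode.normal then some (if inTok then toks ++ [String.ofList cur] else toks) else none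
  | c :: cs, QMode.normal, toks, cur, inTok =>
      if isWs c then
        if inTok then shlexAux cs QMode.normal (toks ++ [String.ofList cur]) [] false
        else shlexAux cs QMode.normal toks cur inTok
      else if c = '\'' then shlexAux cs QMode.squote toks cur true
      else if c = '"' then shlexAux cs QMode.dquote toks cur true
      else if c = '\\' then shlexAux cs QMode.escN toks cur true
      else shlexAux cs QMode.normal toks (cur ++ [c]) true
  | c :: cs, QMode.squote, toks, cur, inTok =>
      if c = '\'' then shlexAux cs QMode.normal toks cur inTok
      else shlexAux cs QMode.squote toks (cur ++ [c]) inTok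
  | c :: cs, QMode.dquote, toks, cur, inTok =>
      if c = '"' then shlexAux cs QMode.normal toks cur inTok
      else if c = '\\' then shlexAux cs QMode.escD toks cur inTok
      else shlexAux cs QMode.dquote toks (cur ++ [c]) inTok
  | c :: cs, QMode.escN, toks, cur, inTok =>
      shlexAux cs QMode.normal toks (cur ++ [c]) inTok
  | c :: cs, QMode.escD, toks, cur, inTok =>
      if c = '"' || c = '\\' then shlexAux cs QMode.dquote toks (cur ++ [c]) inTok
      else shlexAux cs QMode.dquote toks (cur ++ ['\\', c]) inTok

def shlexSplitA? (s : List Char) : Option (List String) :=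
  shlexAux s QMode.normal [] [] false

-- the while-loop of A, two steps of i per recursive call (tokens[i:] is the list argument)
def loopA (arg : String) : List String → Option String → Option String
  | [], cn => cn
  | t :: rest, _cn =>
      if t = "-n" ∨ t = "--name" then
        match rest with
        | v :: rest' => loopA arg rest' (some v)
        | [] => some arg        -- flag token but i+1 < len fails: channel_name = arg; break
      else some arg             -- channel_name = arg; break

def parse_channel_arg_py (arg : Option String) : Option String :=
  match arg with
  | none => none
  | some s =>
      if s = "" then none
      else
        match shlexSplitA? s.toList with
        | none => none          -- shlex.split raises ValueError here; excluded by Pre_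
        | some tokens => loopA s tokens none

-- ===== PORT B =====
-- Transcription of Source B's _tokenize, an index-based scanner over the remaining characters:
-- sqSplit is s.find("'", i + 1) with the slice s[i+1:j] (none = no closing quote → ValueError),
-- dqLoop the inner double-quote while loop, tokLoopF the inner token while loop, outerBF the
-- outer while loop (fuel is only a structural-termination guard; s.length + 1 always suffices);
-- a token is accumulated as its characters (''.join of the parts chunks).
def sqSplit : List Char → Option (List Char × List Char)
  | [] => none
  | c :: cs =>
      if c = '\'' then some ([], cs)
      else
        match sqSplit cs with
        | none => none
        | some (q, rest) => some (c :: q, rest)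

def dqLoop : List Char → List Char → Option (List Char × List Char)
  | [], _ => none                         -- i >= n: ValueError("No closing quotation")
  | c :: cs, parts =>
      if c = '"' then some (parts, cs)
      else if c = '\\' then
        match cs with
        | [] => none                      -- i+1 >= n: ValueError("No closing quotation")
        | nxt :: cs' =>
            dqLoop cs' (parts ++ (if nxt = '"' ∨ nxt = '\\' then [nxt] else ['\\', nxt]))
      else dqLoop cs (parts ++ [c])

def tokLoopF : Nat → List Char → List Char → Option (List Char × List Char)
  | 0, _, _ => none
  | _ + 1, [], parts => some (parts, [])  -- i = n: inner while ends
  | fuel + 1, c :: cs, parts =>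
      if isWs c then some (parts, c :: cs)  -- ws: inner while ends (outer loop resumes here)
      else if c = '\'' then
        match sqSplit cs with
        | none => none                    -- ValueError("No closing quotation")
        | some (q, rest) => tokLoopF fuel rest (parts ++ q)
      else if c = '"' then
        match dqLoop cs parts with
        | none => none
        | some (parts', rest) => tokLoopF fuel rest parts'
      else if c = '\\' then
        match cs with
        | [] => none                      -- ValueError("No escaped character")
        | nxt :: cs' => tokLoopF fuel cs' (parts ++ [nxt])
      else tokLoopF fuel cs (parts ++ [c])

def outerBF : Nat → List Char → List String → Option (List String)
  | 0, _, _ => none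
  | _ + 1, [], toks => some toks
  | fuel + 1, c :: cs, toks =>
      if isWs c then outerBF fuel cs toks
      else
        match tokLoopF (fuel + 1) (c :: cs) [] with
        | none => none
        | some (tok, rest) => outerBF fuel rest (toks ++ [String.ofList tok])

def tokenizeB (s : List Char) : Option (List String) := outerBF (s.length + 1) s []

def everySecond : List String → List String   -- hand port of tokens[0::2] (step-2 slice), exact
  | [] => []
  | [x] => [x]
  | x :: _ :: r => x :: everySecond r

def parse_channel_arg_py_alt (arg : Option String) : Option String :=
  match arg with
  | none => none
  | some s =>
      if s = "" then none
      else
        match tokenizeB s.toList with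
        | none => none          -- _tokenize raises ValueError here; excluded by Pre_
        | some tokens =>
          if tokens = [] then none
          else if tokens.length % 2 == 0
                  && (everySecond tokens).all (fun t => t == "-n" || t == "--name") then
            PySem.List.pyGet? tokens (-1)   -- tokens[-1]
          else some s

-- ===== PRECONDITION & SPEC =====
-- quote/escape well-formedness scanner (modes only, no tokenization): exactly the strings on
-- which shlex.split returns instead of raising ValueError (unclosed quote / trailing backslash).
def quoteScan : List Char → QMode → QMode
  | [], m => m
  | c :: cs, QMode.normal =>
      if isWs c then quoteScan cs QMode.normal
      else if c = '\'' then quoteScan cs QMode.squote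
      else if c = '"' then quoteScan cs QMode.dquote
      else if c = '\\' then quoteScan cs QMode.escN
      else quoteScan cs QMode.normal
  | c :: cs, QMode.squote =>
      if c = '\'' then quoteScan cs QMode.normal else quoteScan cs QMode.squote
  | c :: cs, QMode.dquote =>
      if c = '"' then quoteScan cs QMode.normal
      else if c = '\\' then quoteScan cs QMode.escD
      else quoteScan cs QMode.dquote
  | _ :: cs, QMode.escN => quoteScan cs QMode.normal
  | _ :: cs, QMode.escD => quoteScan cs QMode.dquote

-- Pre_ excludes exactly the strings on which shlex.split (hence both Pythons) raises ValueError: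
-- an unclosed quote or a trailing backslash.
def Pre_parse_channel_arg_py (arg : Option String) : Prop :=
  (arg.map (fun s => quoteScan s.toList QMode.normal == QMode.normal)).getD true = true

instance (arg : Option String) : Decidable (Pre_parse_channel_arg_py arg) := by
  unfold Pre_parse_channel_arg_py; infer_instance

def pvWitness_parse_channel_arg_py : Option String := some "-n 'general chat'"

def Spec_parse_channel_arg_py (arg : Option String) (out : Option String) : Prop := out = parse_channel_arg_py_alt arg
instance (arg : Option String) (out : Option String) : Decidable (Spec_parse_channel_arg_py arg out) := by unfold Spec_parse_channel_arg_py; infer_instance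

-- ===== CLAIM (what is proved, stated in full; the proofs are below) =====
def Claim_equal_parse_channel_arg_py : Prop := ∀ (arg : Option String), Dom_parse_channel_arg_py arg → Pre_parse_channel_arg_py arg → Spec_parse_channel_arg_py arg (parse_channel_arg_py arg)

-- ===== LEMMAS AND PROOFS =====

-- L1: A's single-quote mode is sqSplit followed by the normal mode
theorem shlexAux_squote : ∀ (cs : List Char) (toks : List String) (cur : List Char) (it : Bool),
    shlexAux cs QMode.squote toks cur it =
      match sqSplit cs with
      | none => none
      | some (q, rest) => shlexAux rest QMode.normal toks (cur ++ q) it := by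
  intro cs
  induction cs with
  | nil => intro toks cur it; simp [shlexAux, sqSplit]
  | cons c cs ih =>
      intro toks cur it
      by_cases hc : c = '\''
      · simp [shlexAux, sqSplit, hc]
      · simp only [shlexAux, if_neg hc, sqSplit, ih]
        cases sqSplit cs with
        | none => rfl
        | some p => obtain ⟨q, rest⟩ := p; simp

-- L2: A's double-quote mode is dqLoop followed by the normal mode
theorem shlexAux_dquote : ∀ (cs parts : List Char) (toks : List String) (it : Bool),
    shlexAux cs QMode.dquote toks parts it =
      match dqLoop cs parts with
      | none => none
      | some (parts2, rest) => shlexAux rest QMode.normal toks parts2 it := by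
  intro cs parts
  induction cs, parts using dqLoop.induct with
  | case1 parts => intro toks it; rw [dqLoop.eq_def]; simp [shlexAux]
  | case2 cs parts => intro toks it; rw [dqLoop.eq_def]; simp [shlexAux]
  | case3 parts hne => intro toks it; rw [dqLoop.eq_def]; simp [shlexAux, hne]
  | case4 parts c cs hne ih =>
      intro toks it
      rw [dqLoop.eq_def]
      by_cases hn : c = '"' ∨ c = '\\'
      · have hb : (c == '"' || c == '\\') = true := by
          rcases hn with h | h <;> simp [h]
        simp only [hn, if_true] at ih
        simp [shlexAux, hne, hn, hb, ih]
      · have hb : (c == '"' || c == '\\') = false := by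
          simp only [Bool.or_eq_false_iff, beq_eq_false_iff_ne, ne_eq]
          exact ⟨fun h => hn (Or.inl h), fun h => hn (Or.inr h)⟩
        simp only [hn, if_false] at ih
        simp [shlexAux, hne, hn, hb, ih]
  | case5 c cs parts h1 h2 ih =>
      intro toks it
      rw [dqLoop.eq_def]
      simp [shlexAux, h1, h2, ih]

theorem sqSplit_len : ∀ (cs : List Char) (q rest : List Char),
    sqSplit cs = some (q, rest) → rest.length < cs.length := by
  intro cs
  induction cs with
  | nil => intro q rest h; simp [sqSplit] at h
  | cons c cs ih =>
      intro q rest h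
      by_cases hc : c = '\''
      · simp only [sqSplit, if_pos hc, Option.some.injEq, Prod.mk.injEq] at h
        obtain ⟨h1, h2⟩ := h
        subst h2
        simp only [List.length_cons]; omega
      · simp only [sqSplit, if_neg hc] at h
        cases hsq : sqSplit cs with
        | none => rw [hsq] at h; simp at h
        | some p =>
            rw [hsq] at h
            obtain ⟨q', r'⟩ := p
            simp only [Option.some.injEq, Prod.mk.injEq] at h
            obtain ⟨h1, h2⟩ := h
            subst h2
            have := ih q' r' hsq
            simp only [List.length_cons]; omega

theorem dqLoop_len : ∀ (cs parts q rest : List Char),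
    dqLoop cs parts = some (q, rest) → rest.length < cs.length := by
  intro cs parts
  induction cs, parts using dqLoop.induct with
  | case1 parts => intro q rest h; rw [dqLoop.eq_def] at h; simp at h
  | case2 cs parts =>
      intro q rest h
      rw [dqLoop.eq_def] at h
      simp at h
      obtain ⟨h1, h2⟩ := h
      subst h2
      simp only [List.length_cons]; omega
  | case3 parts hne => intro q rest h; rw [dqLoop.eq_def] at h; simp at h
  | case4 parts c cs hne ih =>
      intro q rest h
      rw [dqLoop.eq_def] at h
      simp at h
      have := ih q rest h
      simp only [List.length_cons]; omega
  | case5 c cs parts h1 h2 ih =>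
      intro q rest h
      rw [dqLoop.eq_def] at h
      simp [h1, h2] at h
      have := ih q rest h
      simp only [List.length_cons]; omega

theorem tokLoopF_len : ∀ (fuel : Nat) (cs parts tok rest : List Char),
    tokLoopF fuel cs parts = some (tok, rest) → rest.length ≤ cs.length := by
  intro fuel
  induction fuel with
  | zero => intro cs parts tok rest h; simp [tokLoopF] at h
  | succ fuel ih =>
      intro cs parts tok rest h
      cases cs with
      | nil =>
          simp only [tokLoopF, Option.some.injEq, Prod.mk.injEq] at h
          obtain ⟨h1, h2⟩ := h
          subst h2
          simp
      | cons c cs =>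
          by_cases hws : isWs c
          · simp only [tokLoopF, if_pos hws, Option.some.injEq, Prod.mk.injEq] at h
            obtain ⟨h1, h2⟩ := h
            subst h2
            simp
          · by_cases hq : c = '\''
            · simp only [tokLoopF, hws, Bool.false_eq_true, if_false, if_pos hq] at h
              cases hsq : sqSplit cs with
              | none => rw [hsq] at h; simp at h
              | some p =>
                  obtain ⟨q, rest'⟩ := p
                  rw [hsq] at h
                  simp only at h
                  have h1 := ih rest' (parts ++ q) tok rest h
                  have h2 := sqSplit_len cs q rest' hsq
                  simp only [List.length_cons]; omega
            · by_cases hd : c = '"'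
              · simp only [tokLoopF, hws, Bool.false_eq_true, if_false, if_neg hq,
                  if_pos hd] at h
                cases hdq : dqLoop cs parts with
                | none => rw [hdq] at h; simp at h
                | some p =>
                    obtain ⟨parts', rest'⟩ := p
                    rw [hdq] at h
                    simp only at h
                    have h1 := ih rest' parts' tok rest h
                    have h2 := dqLoop_len cs parts parts' rest' hdq
                    simp only [List.length_cons]; omega
              · by_cases hbs : c = '\\'
                · simp only [tokLoopF, hws, Bool.false_eq_true, if_false, if_neg hq,
                    if_neg hd, if_pos hbs] at h
                  cases cs with
                  | nil => simp at h
                  | cons nxt cs' =>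
                      simp only at h
                      have := ih cs' (parts ++ [nxt]) tok rest h
                      simp only [List.length_cons]; omega
                · simp only [tokLoopF, hws, Bool.false_eq_true, if_false, if_neg hq,
                    if_neg hd, if_neg hbs] at h
                  have := ih cs (parts ++ [c]) tok rest h
                  simp only [List.length_cons]; omega

theorem tokLoopF_len_lt (fuel : Nat) (c : Char) (cs parts tok rest : List Char)
    (hws : isWs c = false) (h : tokLoopF (fuel + 1) (c :: cs) parts = some (tok, rest)) :
    rest.length < (c :: cs).length := by
  by_cases hq : c = '\''
  · simp only [tokLoopF, hws, Bool.false_eq_true, if_false, if_pos hq] at h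
    cases hsq : sqSplit cs with
    | none => rw [hsq] at h; simp at h
    | some p =>
        obtain ⟨q, rest'⟩ := p
        rw [hsq] at h
        simp only at h
        have h1 := tokLoopF_len fuel rest' (parts ++ q) tok rest h
        have h2 := sqSplit_len cs q rest' hsq
        simp only [List.length_cons]; omega
  · by_cases hd : c = '"'
    · simp only [tokLoopF, hws, Bool.false_eq_true, if_false, if_neg hq, if_pos hd] at h
      cases hdq : dqLoop cs parts with
      | none => rw [hdq] at h; simp at h
      | some p =>
          obtain ⟨parts', rest'⟩ := p
          rw [hdq] at h
          simp only at h
          have h1 := tokLoopF_len fuel rest' parts' tok rest h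
          have h2 := dqLoop_len cs parts parts' rest' hdq
          simp only [List.length_cons]; omega
    · by_cases hbs : c = '\\'
      · simp only [tokLoopF, hws, Bool.false_eq_true, if_false, if_neg hq, if_neg hd,
          if_pos hbs] at h
        cases cs with
        | nil => simp at h
        | cons nxt cs' =>
            simp only at h
            have := tokLoopF_len fuel cs' (parts ++ [nxt]) tok rest h
            simp only [List.length_cons]; omega
      · simp only [tokLoopF, hws, Bool.false_eq_true, if_false, if_neg hq, if_neg hd,
          if_neg hbs] at h
        have := tokLoopF_len fuel cs (parts ++ [c]) tok rest h
        simp only [List.length_cons]; omega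

-- L3: inside a token, A's normal mode with inTok = true is tokLoopF followed by token flush
theorem shlexAux_tokF : ∀ (fuel : Nat) (cs parts : List Char) (toks : List String),
    cs.length < fuel →
    shlexAux cs QMode.normal toks parts true =
      match tokLoopF fuel cs parts with
      | none => none
      | some (tok, rest) => shlexAux rest QMode.normal (toks ++ [String.ofList tok]) [] false := by
  intro fuel
  induction fuel with
  | zero => intro cs parts toks hlen; omega
  | succ fuel ih =>
      intro cs parts toks hlen
      cases cs with
      | nil => simp [tokLoopF, shlexAux]
      | cons c cs =>
          by_cases hws : isWs c
          · simp [tokLoopF, shlexAux, hws]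
          · by_cases hq : c = '\''
            · simp only [tokLoopF, hws, Bool.false_eq_true, if_false, if_pos hq,
                shlexAux, shlexAux_squote]
              cases hsq : sqSplit cs with
              | none => rfl
              | some p =>
                  obtain ⟨q, rest'⟩ := p
                  have h2 := sqSplit_len cs q rest' hsq
                  simp only [List.length_cons] at hlen
                  exact ih rest' (parts ++ q) toks (by omega)
            · by_cases hd : c = '"'
              · simp only [tokLoopF, hws, Bool.false_eq_true, if_false, if_neg hq,
                  if_pos hd, shlexAux, shlexAux_dquote]
                cases hdq : dqLoop cs parts with
                | none => rfl
                | some p =>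
                    obtain ⟨parts', rest'⟩ := p
                    have h2 := dqLoop_len cs parts parts' rest' hdq
                    simp only [List.length_cons] at hlen
                    exact ih rest' parts' toks (by omega)
              · by_cases hbs : c = '\\'
                · simp only [tokLoopF, hws, Bool.false_eq_true, if_false, if_neg hq,
                    if_neg hd, if_pos hbs, shlexAux]
                  cases cs with
                  | nil => rfl
                  | cons nxt cs' =>
                      simp only [List.length_cons] at hlen
                      simp only [shlexAux]
                      exact ih cs' (parts ++ [nxt]) toks (by omega)
                · simp only [tokLoopF, hws, Bool.false_eq_true, if_false, if_neg hq,
                    if_neg hd, if_neg hbs, shlexAux]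
                  simp only [List.length_cons] at hlen
                  exact ih cs (parts ++ [c]) toks (by omega)

-- L4: the whole tokenizers agree
theorem outerBF_eq_shlexAux : ∀ (fuel : Nat) (cs : List Char) (toks : List String),
    cs.length < fuel →
    outerBF fuel cs toks = shlexAux cs QMode.normal toks [] false := by
  intro fuel
  induction fuel with
  | zero => intro cs toks hlen; omega
  | succ fuel ih =>
      intro cs toks hlen
      cases cs with
      | nil => simp [outerBF, shlexAux]
      | cons c cs =>
          simp only [List.length_cons] at hlen
          by_cases hws : isWs c
          · rw [show outerBF (fuel + 1) (c :: cs) toks = outerBF fuel cs toks by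
              simp [outerBF, hws]]
            rw [ih cs toks (by omega)]
            simp [shlexAux, hws]
          · have hws' : isWs c = false := by simpa using hws
            have hstep : shlexAux (c :: cs) QMode.normal toks [] false
                = shlexAux (c :: cs) QMode.normal toks [] true := by
              simp only [shlexAux, hws', Bool.false_eq_true, if_false]
            have h3 := shlexAux_tokF (fuel + 1) (c :: cs) [] toks (by simp; omega)
            rw [hstep, h3]
            simp only [outerBF, hws', Bool.false_eq_true, if_false]
            cases heq : tokLoopF (fuel + 1) (c :: cs) [] with
            | none => rfl
            | some p =>
                obtain ⟨tok, rest⟩ := p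
                simp only
                have hr := tokLoopF_len_lt fuel c cs [] tok rest hws' heq
                simp only [List.length_cons] at hr
                exact ih rest (toks ++ [String.ofList tok]) (by omega)

theorem tokenize_agree (s : List Char) : tokenizeB s = shlexSplitA? s := by
  unfold tokenizeB shlexSplitA?
  exact outerBF_eq_shlexAux (s.length + 1) s [] (by omega)

-- A's loop, started with channel_name = anything, computes B's validity-predicate result.
theorem loopA_eq (arg : String) :
    ∀ ts : List String, ∀ cn : Option String, ts ≠ [] →
      loopA arg ts cn =
        if ts.length % 2 == 0
            && (everySecond ts).all (fun t => t == "-n" || t == "--name") then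
          ts.getLast?
        else some arg := by
  intro ts
  induction ts using everySecond.induct with
  | case1 => intro cn h; exact absurd rfl h
  | case2 x =>
      intro cn _
      by_cases hx : x = "-n" ∨ x = "--name"
      · simp [loopA, hx]
      · have hxB : (x == "-n" || x == "--name") = false := by
          simp only [Bool.or_eq_false_iff, beq_eq_false_iff_ne, ne_eq]
          exact ⟨fun h => hx (Or.inl h), fun h => hx (Or.inr h)⟩
        simp [loopA, hx, everySecond, hxB]
  | case3 x y r ih =>
      intro cn _
      by_cases hx : x = "-n" ∨ x = "--name"
      · have hxB : (x == "-n" || x == "--name") = true := by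
          rcases hx with h | h <;> simp [h]
        cases r with
        | nil => simp [loopA, hx, everySecond, hxB]
        | cons a as =>
            have := ih (some y) (by simp)
            simp only [loopA, if_pos hx] at *
            rw [this]
            have hlen : ((x :: y :: a :: as).length % 2 == 0)
                = ((a :: as).length % 2 == 0) := by
              simp [List.length_cons]; omega
            have hev : everySecond (x :: y :: a :: as) = x :: everySecond (a :: as) := rfl
            have hlast : (x :: y :: a :: as).getLast? = (a :: as).getLast? := by
              simp [List.getLast?_cons_cons]
            rw [hev, hlast, hlen]
            simp [hxB]
      · have hxB : (x == "-n" || x == "--name") = false := by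
          simp only [Bool.or_eq_false_iff, beq_eq_false_iff_ne, ne_eq]
          exact ⟨fun h => hx (Or.inl h), fun h => hx (Or.inr h)⟩
        simp [loopA, hx, everySecond, hxB]

-- ===== VERDICT (by name: the statement is the Claim_ definition above) =====
theorem parse_channel_arg_py_spec : Claim_equal_parse_channel_arg_py := by
  unfold Claim_equal_parse_channel_arg_py
  intro arg _ _
  unfold Spec_parse_channel_arg_py
  cases arg with
  | none => rfl
  | some s =>
      by_cases hs : s = ""
      · simp [parse_channel_arg_py, parse_channel_arg_py_alt, hs]
      · simp only [parse_channel_arg_py, parse_channel_arg_py_alt, if_neg hs]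
        rw [tokenize_agree]
        cases hsp : shlexSplitA? s.toList with
        | none => rfl
        | some tokens =>
            cases tokens with
            | nil => simp [loopA]
            | cons t ts =>
                have h := loopA_eq s (t :: ts) none (by simp)
                have hneg : PySem.List.pyGet? (t :: ts) (-1) = (t :: ts).getLast? :=
                  PySem.List.pyGet?_neg_one _
                simp [h, hneg]
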